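-- pv_equiv track=rewrite | github.com/vinchinzu/euler | python/332.py | _pairwise_dots
-- ===== SOURCE A (Python) =====
-- from typing import List, Sequence, Tuple
--
-- Point3D = Tuple[int, int, int]
--
-- def _pairwise_dots(points: Sequence[Point3D]) -> List[List[int]]:
--     """Return dot products p_i · p_j for all point pairs."""
--
--     n = len(points)
--     dots: List[List[int]] = [[0] * n for _ in range(n)]
--
--     for i in range(n):
--         x1, y1, z1 = points[i]
--         for j in range(i + 1, n):
--             x2, y2, z2 = points[j]
--             value = x1 * x2 + y1 * y2 + z1 * z2
--             dots[i][j] = value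
--             dots[j][i] = value
--
--     return dots
-- ===== SOURCE B (Python) =====
-- from typing import List, Sequence, Tuple
--
-- Point3D = Tuple[int, int, int]
--
-- def _pairwise_dots(points: Sequence[Point3D]) -> List[List[int]]:
--     """Return dot products p_i . p_j for all point pairs (0 on the diagonal)."""
--     return [
--         [0 if i == j else x1 * x2 + y1 * y2 + z1 * z2
--          for j, (x2, y2, z2) in enumerate(points)]
--         for i, (x1, y1, z1) in enumerate(points)
--     ]
-- ===== Notes on version B (the rewrite author's own statement) =====
-- stated objective: simpler
-- what changed: Replaces the pre-allocated mutable matrix filled by an upper-triangle loop with symmetric mirrored writes by a single nested list comprehension that computes every cell independently (0 on the diagonal, the dot product elsewhere).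
import Mathlib
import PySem

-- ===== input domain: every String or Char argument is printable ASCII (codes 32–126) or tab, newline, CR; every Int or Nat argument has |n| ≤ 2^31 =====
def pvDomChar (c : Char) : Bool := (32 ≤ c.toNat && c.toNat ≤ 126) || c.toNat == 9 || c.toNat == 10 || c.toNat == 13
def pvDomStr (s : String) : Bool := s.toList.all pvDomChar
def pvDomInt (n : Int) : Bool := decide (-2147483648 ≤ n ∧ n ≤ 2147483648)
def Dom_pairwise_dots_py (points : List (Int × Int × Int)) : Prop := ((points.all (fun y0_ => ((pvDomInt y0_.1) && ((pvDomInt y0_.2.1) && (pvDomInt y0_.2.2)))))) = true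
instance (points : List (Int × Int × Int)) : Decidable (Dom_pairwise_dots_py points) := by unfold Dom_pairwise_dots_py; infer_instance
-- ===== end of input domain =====

-- B replaces A's pre-allocated matrix filled over the upper triangle with mirrored
-- writes by a nested list comprehension computing every cell independently (simpler).

-- ===== PORT A =====
-- dots[i][j] = value  (i, j are in-range nonnegative indices)
def pvSet2 (m : List (List Int)) (i j : Nat) (v : Int) : List (List Int) :=
  m.modify i (fun row => row.set j v)

def pairwise_dots_py (points : List (Int × Int × Int)) : List (List Int) :=
  let n := points.length
  let dots := List.replicate n (List.replicate n (0 : Int))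
  -- for i in range(n): … for j in range(i+1, n): …  (loop indices are in range,
  -- so points[i] / points[j] are read with getD — exact here)
  (List.range n).foldl (fun dots i =>
    let p := points.getD i (0, 0, 0)
    (List.range' (i + 1) (n - (i + 1))).foldl (fun dots j =>
      let q := points.getD j (0, 0, 0)
      let value := p.1 * q.1 + p.2.1 * q.2.1 + p.2.2 * q.2.2
      pvSet2 (pvSet2 dots i j value) j i value) dots) dots

-- ===== PORT B =====
def pairwise_dots_py_alt (points : List (Int × Int × Int)) : List (List Int) :=
  (PySem.List.enumerate points 0).map (fun ip =>
    (PySem.List.enumerate points 0).map (fun jq =>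
      if ip.1 = jq.1 then 0
      else ip.2.1 * jq.2.1 + ip.2.2.1 * jq.2.2.1 + ip.2.2.2 * jq.2.2.2))

-- ===== PRECONDITION & SPEC =====
def Spec_pairwise_dots_py (points : List (Int × Int × Int)) (out : List (List Int)) : Prop := out = pairwise_dots_py_alt points
instance (points : List (Int × Int × Int)) (out : List (List Int)) : Decidable (Spec_pairwise_dots_py points out) := by unfold Spec_pairwise_dots_py; infer_instance

-- ===== CLAIM (what is proved, stated in full; the proofs are below) =====
def Claim_equal_pairwise_dots_py : Prop := ∀ (points : List (Int × Int × Int)), Dom_pairwise_dots_py points → Spec_pairwise_dots_py points (pairwise_dots_py points)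

-- ===== LEMMAS AND PROOFS =====

-- matrix entry read (0 / [] defaults; we only read in-range entries in the end)
def pvEntry (m : List (List Int)) (a b : Nat) : Int := (m.getD a []).getD b 0

-- dot product of the points at indices a and b
def pvG (points : List (Int × Int × Int)) (a b : Nat) : Int :=
  let p := points.getD a (0, 0, 0)
  let q := points.getD b (0, 0, 0)
  p.1 * q.1 + p.2.1 * q.2.1 + p.2.2 * q.2.2

def pvShape (m : List (List Int)) (n : Nat) : Prop :=
  m.length = n ∧ ∀ row ∈ m, row.length = n

theorem pvShape_set2 {m : List (List Int)} {n i j : Nat} (v : Int)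
    (h : pvShape m n) : pvShape (pvSet2 m i j v) n := by
  obtain ⟨hl, hr⟩ := h
  refine ⟨by simpa [pvSet2] using hl, ?_⟩
  intro row hrow
  obtain ⟨k, hk⟩ := List.getElem?_of_mem hrow
  simp only [pvSet2, List.getElem?_modify] at hk
  cases hmk : m[k]? with
  | none => simp [hmk] at hk
  | some r =>
    have hrlen := hr r (List.mem_of_getElem? hmk)
    rw [hmk] at hk
    have hk' : (if i = k then r.set j v else r) = row := by simpa using hk
    rw [← hk']; split <;> simp [hrlen]

theorem pvEntry_set2 {m : List (List Int)} {n i j : Nat} (v : Int)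
    (h : pvShape m n) (hi : i < n) (hj : j < n) (a b : Nat) :
    pvEntry (pvSet2 m i j v) a b = if a = i ∧ b = j then v else pvEntry m a b := by
  obtain ⟨hl, hr⟩ := h
  by_cases hai : a = i
  · subst hai
    have hlt : a < m.length := hl ▸ hi
    have hjlen : j < (m[a]).length := by rw [hr _ (List.getElem_mem hlt)]; exact hj
    by_cases hbj : b = j
    · subst hbj
      simp [pvEntry, pvSet2, List.getD_eq_getElem?_getD, List.getElem?_modify,
        List.getElem?_eq_getElem hlt, List.getElem?_set, hjlen]
    · simp [pvEntry, pvSet2, List.getD_eq_getElem?_getD, List.getElem?_modify,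
        List.getElem?_eq_getElem hlt, List.getElem?_set, hbj,
        show j ≠ b from fun h => hbj h.symm]
  · have hia : i ≠ a := fun h => hai h.symm
    have hne : ¬(a = i ∧ b = j) := fun hp => hai hp.1
    simp [pvEntry, pvSet2, List.getD_eq_getElem?_getD, List.getElem?_modify, hia, hne]

theorem pvEntry_mirror {m : List (List Int)} {n i j : Nat} (v : Int)
    (h : pvShape m n) (hi : i < n) (hj : j < n) (a b : Nat) :
    pvEntry (pvSet2 (pvSet2 m i j v) j i v) a b =
      if (a = i ∧ b = j) ∨ (a = j ∧ b = i) then v else pvEntry m a b := by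
  rw [pvEntry_set2 v (pvShape_set2 v h) hj hi, pvEntry_set2 v h hi hj]
  split_ifs <;> first | rfl | tauto

theorem pvG_symm (points : List (Int × Int × Int)) (a b : Nat) :
    pvG points a b = pvG points b a := by
  simp only [pvG]; ring

-- inner loop: for j ∈ js set (i,j) and (j,i) to the dot product
theorem pvInner_shape (points : List (Int × Int × Int)) (i : Nat) (js : List Nat)
    {m : List (List Int)} {n : Nat} (h : pvShape m n) :
    pvShape (js.foldl (fun dots j =>
      let q := points.getD j (0, 0, 0)
      let p := points.getD i (0, 0, 0)
      let value := p.1 * q.1 + p.2.1 * q.2.1 + p.2.2 * q.2.2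
      pvSet2 (pvSet2 dots i j value) j i value) m) n := by
  induction js generalizing m with
  | nil => exact h
  | cons j js ih => exact ih (pvShape_set2 _ (pvShape_set2 _ h))

theorem pvInner_entry (points : List (Int × Int × Int)) (i : Nat) (js : List Nat)
    {m : List (List Int)} {n : Nat} (h : pvShape m n) (hi : i < n)
    (hjs : ∀ j ∈ js, j < n) (a b : Nat) :
    pvEntry (js.foldl (fun dots j =>
      let q := points.getD j (0, 0, 0)
      let p := points.getD i (0, 0, 0)
      let value := p.1 * q.1 + p.2.1 * q.2.1 + p.2.2 * q.2.2
      pvSet2 (pvSet2 dots i j value) j i value) m) a b =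
    if (∃ j ∈ js, (a = i ∧ b = j) ∨ (a = j ∧ b = i)) then pvG points a b
    else pvEntry m a b := by
  induction js generalizing m with
  | nil => simp
  | cons j js ih =>
    have hj : j < n := hjs j (by simp)
    simp only [List.foldl_cons]
    rw [ih (pvShape_set2 _ (pvShape_set2 _ h)) (fun x hx => hjs x (by simp [hx]))]
    rw [pvEntry_mirror _ h hi hj]
    by_cases hrest : ∃ x ∈ js, (a = i ∧ b = x) ∨ (a = x ∧ b = i)
    · have hall : ∃ x ∈ j :: js, (a = i ∧ b = x) ∨ (a = x ∧ b = i) := by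
        rcases hrest with ⟨x, hx, hor⟩; exact ⟨x, by simp [hx], hor⟩
      rw [if_pos hrest, if_pos hall]
    · rw [if_neg hrest]
      by_cases hcur : (a = i ∧ b = j) ∨ (a = j ∧ b = i)
      · have hall : ∃ x ∈ j :: js, (a = i ∧ b = x) ∨ (a = x ∧ b = i) := ⟨j, by simp, hcur⟩
        rw [if_pos hcur, if_pos hall]
        rcases hcur with ⟨rfl, rfl⟩ | ⟨rfl, rfl⟩
        · rfl
        · rw [pvG_symm]; rfl
      · have hnone : ¬∃ x ∈ j :: js, (a = i ∧ b = x) ∨ (a = x ∧ b = i) := by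
          rintro ⟨x, hx, hor⟩
          rcases List.mem_cons.mp hx with rfl | hx
          · exact hcur hor
          · exact hrest ⟨x, hx, hor⟩
        rw [if_neg hcur, if_neg hnone]

-- outer loop over the i's
theorem pvOuter_entry (points : List (Int × Int × Int)) (is : List Nat)
    {m : List (List Int)} (h : pvShape m points.length)
    (his : ∀ i ∈ is, i < points.length) (a b : Nat) :
    pvEntry (is.foldl (fun dots i =>
      let p := points.getD i (0, 0, 0)
      (List.range' (i + 1) (points.length - (i + 1))).foldl (fun dots j =>
        let q := points.getD j (0, 0, 0)
        let value := p.1 * q.1 + p.2.1 * q.2.1 + p.2.2 * q.2.2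
        pvSet2 (pvSet2 dots i j value) j i value) dots) m) a b =
    if (∃ i ∈ is, (a = i ∧ i < b ∧ b < points.length) ∨ (b = i ∧ i < a ∧ a < points.length))
    then pvG points a b else pvEntry m a b := by
  induction is generalizing m with
  | nil => simp
  | cons i is ih =>
    have hi : i < points.length := his i (by simp)
    simp only [List.foldl_cons]
    rw [ih (pvInner_shape points i _ h) (fun x hx => his x (by simp [hx]))]
    rw [pvInner_entry points i _ h hi (fun j hj => by
      have := List.mem_range'_1.mp hj; omega)]
    have hiff : (∃ j ∈ List.range' (i + 1) (points.length - (i + 1)),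
        (a = i ∧ b = j) ∨ (a = j ∧ b = i)) ↔
        ((a = i ∧ i < b ∧ b < points.length) ∨ (b = i ∧ i < a ∧ a < points.length)) := by
      constructor
      · rintro ⟨j, hj, hor⟩
        have hjr := List.mem_range'_1.mp hj
        rcases hor with ⟨rfl, rfl⟩ | ⟨rfl, rfl⟩
        · left; omega
        · right; omega
      · rintro (⟨rfl, h1, h2⟩ | ⟨rfl, h1, h2⟩)
        · exact ⟨b, List.mem_range'_1.mpr (by omega), Or.inl ⟨rfl, rfl⟩⟩
        · exact ⟨a, List.mem_range'_1.mpr (by omega), Or.inr ⟨rfl, rfl⟩⟩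
    simp only [hiff]
    by_cases hrest : ∃ x ∈ is,
        (a = x ∧ x < b ∧ b < points.length) ∨ (b = x ∧ x < a ∧ a < points.length)
    · have hall : ∃ x ∈ i :: is,
          (a = x ∧ x < b ∧ b < points.length) ∨ (b = x ∧ x < a ∧ a < points.length) := by
        rcases hrest with ⟨x, hx, hor⟩; exact ⟨x, by simp [hx], hor⟩
      rw [if_pos hrest, if_pos hall]
    · rw [if_neg hrest]
      by_cases hcur : (a = i ∧ i < b ∧ b < points.length) ∨ (b = i ∧ i < a ∧ a < points.length)
      · have hall : ∃ x ∈ i :: is,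
            (a = x ∧ x < b ∧ b < points.length) ∨ (b = x ∧ x < a ∧ a < points.length) :=
          ⟨i, by simp, hcur⟩
        rw [if_pos hcur, if_pos hall]
      · have hnone : ¬∃ x ∈ i :: is,
            (a = x ∧ x < b ∧ b < points.length) ∨ (b = x ∧ x < a ∧ a < points.length) := by
          rintro ⟨x, hx, hor⟩
          rcases List.mem_cons.mp hx with rfl | hx
          · exact hcur hor
          · exact hrest ⟨x, hx, hor⟩
        rw [if_neg hcur, if_neg hnone]

theorem pvA_entry (points : List (Int × Int × Int)) (a b : Nat)
    (ha : a < points.length) (hb : b < points.length) :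
    pvEntry (pairwise_dots_py points) a b = if a = b then 0 else pvG points a b := by
  have hshape : pvShape (List.replicate points.length (List.replicate points.length (0 : Int)))
      points.length := ⟨by simp, by intro row hrow; simp_all [List.eq_of_mem_replicate hrow]⟩
  unfold pairwise_dots_py
  simp only
  rw [pvOuter_entry points _ hshape (fun i hi => List.mem_range.mp hi) a b]
  have hentry0 : pvEntry (List.replicate points.length
      (List.replicate points.length (0 : Int))) a b = 0 := by
    simp [pvEntry, List.getD_eq_getElem?_getD, List.getElem?_replicate, ha]
    split <;> simp
  by_cases hab : a = b
  · subst hab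
    rw [if_pos rfl, if_neg, hentry0]
    rintro ⟨x, _, ⟨rfl, h1, _⟩ | ⟨rfl, h1, _⟩⟩ <;> omega
  · rw [if_neg hab, if_pos]
    rcases Nat.lt_or_ge a b with hlt | hge
    · exact ⟨a, List.mem_range.mpr ha, Or.inl ⟨rfl, hlt, hb⟩⟩
    · exact ⟨b, List.mem_range.mpr hb, Or.inr ⟨rfl, by omega, ha⟩⟩

theorem pvOuter_shape (points : List (Int × Int × Int)) (is : List Nat)
    {m : List (List Int)} {n : Nat} (h : pvShape m n) :
    pvShape (is.foldl (fun dots i =>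
      let p := points.getD i (0, 0, 0)
      (List.range' (i + 1) (points.length - (i + 1))).foldl (fun dots j =>
        let q := points.getD j (0, 0, 0)
        let value := p.1 * q.1 + p.2.1 * q.2.1 + p.2.2 * q.2.2
        pvSet2 (pvSet2 dots i j value) j i value) dots) m) n := by
  induction is generalizing m with
  | nil => exact h
  | cons i is ih => exact ih (pvInner_shape points i _ h)

theorem pvA_shape (points : List (Int × Int × Int)) :
    pvShape (pairwise_dots_py points) points.length := by
  have hshape : pvShape (List.replicate points.length (List.replicate points.length (0 : Int)))
      points.length := ⟨by simp, by intro row hrow; simp_all [List.eq_of_mem_replicate hrow]⟩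
  exact pvOuter_shape points _ hshape

theorem pvB_entry (points : List (Int × Int × Int)) (a b : Nat)
    (ha : a < points.length) (hb : b < points.length) :
    (pairwise_dots_py_alt points)[a]'(by simp [pairwise_dots_py_alt, ha]) =
      (PySem.List.enumerate points 0).map (fun jq =>
        if (a : Int) = jq.1 then 0
        else (points[a]).1 * jq.2.1 + (points[a]).2.1 * jq.2.2.1 + (points[a]).2.2 * jq.2.2.2) := by
  simp [pairwise_dots_py_alt, PySem.List.getElem_enumerate]

theorem pvEntry_eq_getElem {m : List (List Int)} {n a b : Nat} (h : pvShape m n)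
    (ha : a < n) (hb : b < n) :
    pvEntry m a b = (m[a]'(h.1 ▸ ha))[b]'(by rw [h.2 _ (List.getElem_mem _)]; exact hb) := by
  have hma : m[a]? = some (m[a]'(h.1 ▸ ha)) := List.getElem?_eq_getElem (h.1 ▸ ha)
  simp [pvEntry, List.getD_eq_getElem?_getD, hma,
    List.getElem?_eq_getElem (show b < (m[a]'(h.1 ▸ ha)).length by
      rw [h.2 _ (List.getElem_mem _)]; exact hb)]

-- ===== VERDICT (by name: the statement is the Claim_ definition above) =====
theorem pairwise_dots_py_spec : Claim_equal_pairwise_dots_py := by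
  intro points _
  unfold Spec_pairwise_dots_py
  have hshape := pvA_shape points
  have hBlen : (pairwise_dots_py_alt points).length = points.length := by
    simp [pairwise_dots_py_alt]
  apply List.ext_getElem (by rw [hshape.1, hBlen])
  intro a ha ha'
  have haP : a < points.length := hshape.1 ▸ ha
  have hrowA : (pairwise_dots_py points)[a].length = points.length :=
    hshape.2 _ (List.getElem_mem _)
  have hrowB : ((pairwise_dots_py_alt points)[a]'ha').length = points.length := by
    rw [pvB_entry points a a haP haP]; simp
  apply List.ext_getElem (by rw [hrowA, hrowB])
  intro b hb hb'
  have hbP : b < points.length := hrowA ▸ hb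
  have hA : (pairwise_dots_py points)[a][b] = if a = b then 0 else pvG points a b := by
    rw [← pvEntry_eq_getElem hshape haP hbP, pvA_entry points a b haP hbP]
  have hB : ((pairwise_dots_py_alt points)[a]'ha')[b]'hb' =
      if (a : Int) = (b : Int) then 0 else pvG points a b := by
    have := pvB_entry points a b haP hbP
    simp only [this, List.getElem_map, PySem.List.getElem_enumerate]
    simp [pvG, List.getD_eq_getElem?_getD, List.getElem?_eq_getElem haP,
      List.getElem?_eq_getElem hbP]
  rw [hA, hB]
  by_cases hab : a = b <;> simp [hab]
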